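-- pv_equiv track=rewrite | github.com/EGAdams/planner | docling/g5_statement_filter.py | parse_account_info
-- ===== SOURCE A (Python) =====
-- def parse_account_info(lines):
--     account_type = None
--     account_number = None
--     for ln in lines:
--         if ln.startswith("Account Type:"):
--             account_type = ln.split(":",1)[1].strip()
--         if ln.startswith("Account Number:"):
--             account_number = ln.split(":",1)[1].strip()
--     return account_type, account_number
-- ===== SOURCE B (Python) =====
-- def parse_account_info(lines):
--     fields = {}
--     for ln in lines:
--         key, sep, val = ln.partition(":")
--         if sep:
--             fields[key] = val.strip()
--     return fields.get("Account Type"), fields.get("Account Number")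
-- ===== Notes on version B (the rewrite author's own statement) =====
-- stated objective: idiomatic
-- what changed: Instead of testing each line against the two hard-coded prefixes and re-splitting it, B splits every line once at its first colon into a dict of fields (last write wins) and looks the two keys up afterwards.
import Mathlib
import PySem

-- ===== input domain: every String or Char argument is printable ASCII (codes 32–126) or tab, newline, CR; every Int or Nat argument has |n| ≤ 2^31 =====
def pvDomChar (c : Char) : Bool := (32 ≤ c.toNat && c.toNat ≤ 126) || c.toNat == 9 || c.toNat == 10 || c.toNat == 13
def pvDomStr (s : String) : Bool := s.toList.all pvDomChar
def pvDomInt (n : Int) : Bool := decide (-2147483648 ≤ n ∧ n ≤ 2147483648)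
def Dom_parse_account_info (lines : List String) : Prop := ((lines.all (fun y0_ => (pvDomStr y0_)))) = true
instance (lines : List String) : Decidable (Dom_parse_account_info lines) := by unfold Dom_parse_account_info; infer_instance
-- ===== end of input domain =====

-- B replaces the two hard-coded prefix tests per line by one split at the first colon
-- collected into a dict of fields looked up afterwards (idiomatic; same cost).


-- ===== PORT A =====
-- one iteration of A's for-loop body over the (account_type, account_number) state
def pvAStep (st : Option String × Option String) (ln : String) : Option String × Option String :=
  let t := if PySem.Str.startswith ln "Account Type:" then
      match PySem.List.pyGet? ((PySem.Str.splitMax? ln ":" 1).getD []) 1 with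
      | some v => some (PySem.Str.strip v)
      | none => st.1   -- unreachable: the matched prefix contains ':'
    else st.1
  let n := if PySem.Str.startswith ln "Account Number:" then
      match PySem.List.pyGet? ((PySem.Str.splitMax? ln ":" 1).getD []) 1 with
      | some v => some (PySem.Str.strip v)
      | none => st.2   -- unreachable: the matched prefix contains ':'
    else st.2
  (t, n)

def parse_account_info (lines : List String) : Option String × Option String :=
  lines.foldl pvAStep (none, none)

-- ===== PORT B =====
-- one iteration of B's loop: ln.partition(":") ported by hand (exact for a 1-char separator:
-- the part before the first ':' and the rest after it; no colon → sep is empty → skip)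
def pvBStep (d : PySem.Dict String String) (ln : String) : PySem.Dict String String :=
  let cs := ln.toList
  let key := cs.takeWhile (fun c => c ≠ ':')
  match cs.dropWhile (fun c => c ≠ ':') with
  | [] => d
  | _ :: val => d.insert (String.ofList key) (PySem.Str.strip (String.ofList val))

def parse_account_info_alt (lines : List String) : Option String × Option String :=
  let fields := lines.foldl pvBStep PySem.Dict.empty
  (fields.get? "Account Type", fields.get? "Account Number")

-- ===== PRECONDITION & SPEC =====
def Spec_parse_account_info (lines : List String) (out : Option String × Option String) : Prop := out = parse_account_info_alt lines
instance (lines : List String) (out : Option String × Option String) : Decidable (Spec_parse_account_info lines out) := by unfold Spec_parse_account_info; infer_instance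

-- ===== CLAIM (what is proved, stated in full; the proofs are below) =====
def Claim_equal_parse_account_info : Prop := ∀ (lines : List String), Dom_parse_account_info lines → Spec_parse_account_info lines (parse_account_info lines)

-- ===== LEMMAS AND PROOFS =====

theorem pv_go_zero (f : Nat) (l : List Char) (acc : List (List Char)) :
    PySem.Chars.splitOnMax.go [':'] f 0 l [] acc = (l :: acc).reverse := by
  cases f with
  | zero => simp [PySem.Chars.splitOnMax.go]
  | succ f => cases l <;> simp [PySem.Chars.splitOnMax.go]

theorem pv_go_skip (pre : List Char) (h : ':' ∉ pre) :
    ∀ (fuel : Nat) (rest cur : List Char) (acc : List (List Char)),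
    PySem.Chars.splitOnMax.go [':'] (fuel + pre.length) 1 (pre ++ ':' :: rest) cur acc
      = PySem.Chars.splitOnMax.go [':'] fuel 1 (':' :: rest) (pre.reverse ++ cur) acc := by
  induction pre with
  | nil => intro fuel rest cur acc; simp
  | cons c pre ih =>
    intro fuel rest cur acc
    have hc : c ≠ ':' := by intro hc; exact h (hc ▸ List.mem_cons_self)
    have hpre : ':' ∉ pre := fun hm => h (List.mem_cons_of_mem _ hm)
    have he : fuel + (c :: pre).length = (fuel + pre.length) + 1 := by simp; omega
    rw [he]
    have step : PySem.Chars.splitOnMax.go [':'] ((fuel + pre.length) + 1) 1 (c :: (pre ++ ':' :: rest)) cur acc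
        = PySem.Chars.splitOnMax.go [':'] (fuel + pre.length) 1 (pre ++ ':' :: rest) (c :: cur) acc := by
      rw [PySem.Chars.splitOnMax.go]
      simp [List.isPrefixOf, hc.symm]
    exact step.trans ((ih hpre fuel rest (c :: cur) acc).trans (by simp))

theorem pv_splitColon (pre rest : List Char) (h : ':' ∉ pre) :
    PySem.Chars.splitOnMax (pre ++ ':' :: rest) [':'] 1 = [pre, rest] := by
  have hlen : (pre ++ ':' :: rest).length + 1 = (rest.length + 2) + pre.length := by simp; omega
  rw [PySem.Chars.splitOnMax]
  simp only [show ¬((1:Int) < 0) from by omega, if_false, Int.toNat_one]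
  rw [hlen, pv_go_skip pre h (rest.length + 2) rest [] []]
  rw [show (rest.length + 2) = (rest.length + 1) + 1 from rfl]
  rw [PySem.Chars.splitOnMax.go]
  simp [List.isPrefixOf, pv_go_zero]

-- splitting pre ++ ':' :: r at the first colon yields pre and ':' :: r
theorem pv_part (pre r : List Char) (h : ':' ∉ pre) :
    (pre ++ ':' :: r).takeWhile (fun c => c ≠ ':') = pre ∧
    (pre ++ ':' :: r).dropWhile (fun c => c ≠ ':') = ':' :: r := by
  induction pre with
  | nil => constructor <;> simp
  | cons c pre ih =>
    have hc : c ≠ ':' := by intro hc; exact h (hc ▸ List.mem_cons_self)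
    have hpre : ':' ∉ pre := fun hm => h (List.mem_cons_of_mem _ hm)
    obtain ⟨h1, h2⟩ := ih hpre
    constructor
    · rw [List.cons_append, List.takeWhile_cons, if_pos (by simp [hc]), h1]
    · rw [List.cons_append, List.dropWhile_cons, if_pos (by simp [hc]), h2]

theorem pv_drop_head (p : Char → Bool) : ∀ (l : List Char) (x : Char) (xs : List Char),
    l.dropWhile p = x :: xs → p x = false := by
  intro l
  induction l with
  | nil => intro x xs hx; simp at hx
  | cons c cs ih =>
    intro x xs hx
    by_cases hpc : p c = true
    · rw [List.dropWhile_cons_of_pos hpc] at hx; exact ih x xs hx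
    · rw [List.dropWhile_cons_of_neg hpc] at hx
      cases hx; simpa using hpc

-- when the line contains a colon: A's startswith test on "<Key>:" fires iff B's field key is <Key>
theorem pv_sw_iff (ln keyS : String) (val : List Char)
    (hk : ':' ∉ keyS.toList)
    (hln : ln.toList = ln.toList.takeWhile (fun c => c ≠ ':') ++ ':' :: val) :
    PySem.Str.startswith ln (keyS ++ ":") = true ↔
      ln.toList.takeWhile (fun c => c ≠ ':') = keyS.toList := by
  constructor
  · intro hs
    rw [show PySem.Str.startswith ln (keyS ++ ":") = PySem.Chars.startswith ln.toList (keyS ++ ":").toList from by simp] at hs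
    rw [PySem.Chars.startswith_iff] at hs
    obtain ⟨tl, htl⟩ := hs
    have hdec : ln.toList = keyS.toList ++ ':' :: tl := by
      rw [← htl]; simp
    rw [hdec, (pv_part keyS.toList tl hk).1]
  · intro hp
    rw [show PySem.Str.startswith ln (keyS ++ ":") = PySem.Chars.startswith ln.toList (keyS ++ ":").toList from by simp]
    rw [PySem.Chars.startswith_iff]
    refine ⟨val, ?_⟩
    rw [show (keyS ++ ":").toList = keyS.toList ++ [':'] from by simp, List.append_assoc, ← hp]
    exact hln.symm

theorem pv_step (d : PySem.Dict String String) (st : Option String × Option String) (ln : String)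
    (h1 : d.get? "Account Type" = st.1) (h2 : d.get? "Account Number" = st.2) :
    (pvBStep d ln).get? "Account Type" = (pvAStep st ln).1 ∧
    (pvBStep d ln).get? "Account Number" = (pvAStep st ln).2 := by
  cases hdrop : ln.toList.dropWhile (fun c => c ≠ ':') with
  | nil =>
    have hnc : ':' ∉ ln.toList := by
      intro hm
      have hsplit := List.takeWhile_append_dropWhile (p := fun c => decide (c ≠ ':')) (l := ln.toList)
      rw [hdrop, List.append_nil] at hsplit
      have := List.mem_takeWhile_imp (hsplit ▸ hm)
      simp at this
    have hswF : ∀ p : String, ':' ∈ p.toList → PySem.Str.startswith ln p = false := by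
      intro p hpcolon
      by_contra hne
      have htrue : PySem.Str.startswith ln p = true := by
        cases hb : PySem.Str.startswith ln p
        · exact absurd hb hne
        · rfl
      rw [show PySem.Str.startswith ln p = PySem.Chars.startswith ln.toList p.toList from by simp,
        PySem.Chars.startswith_iff] at htrue
      exact hnc (htrue.subset hpcolon)
    constructor
    · simp only [pvBStep, pvAStep, hdrop, hswF "Account Type:" (by decide)]
      exact h1
    · simp only [pvBStep, pvAStep, hdrop, hswF "Account Number:" (by decide)]
      exact h2
  | cons x val =>
    have hx : x = ':' := by
      have := pv_drop_head (fun c => decide (c ≠ ':')) ln.toList x val hdrop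
      simpa using this
    subst hx
    have hln : ln.toList = ln.toList.takeWhile (fun c => c ≠ ':') ++ ':' :: val := by
      conv_lhs => rw [← List.takeWhile_append_dropWhile (p := fun c => decide (c ≠ ':')) (l := ln.toList)]
      rw [hdrop]
    have hprecolon : ':' ∉ ln.toList.takeWhile (fun c => c ≠ ':') := by
      intro hm
      have := List.mem_takeWhile_imp hm
      simp at this
    have hsplit : PySem.Str.splitMax? ln ":" 1
        = some [String.ofList (ln.toList.takeWhile (fun c => c ≠ ':')), String.ofList val] := by
      rw [PySem.Str.splitMax?, PySem.Chars.splitMax?]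
      rw [show (":" : String).toList = [':'] from rfl]
      conv_lhs => rw [hln]
      rw [pv_splitColon _ val hprecolon]
      rfl
    have hTiff := pv_sw_iff ln "Account Type" val (by decide) hln
    have hNiff := pv_sw_iff ln "Account Number" val (by decide) hln
    rw [show ("Account Type" ++ ":" : String) = "Account Type:" from by decide] at hTiff
    rw [show ("Account Number" ++ ":" : String) = "Account Number:" from by decide] at hNiff
    have hval : PySem.List.pyGet? ((PySem.Str.splitMax? ln ":" 1).getD []) 1 = some (String.ofList val) := by
      rw [hsplit]
      simp [PySem.List.pyGet?, PySem.List.pyIdx?]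
    have hBval : pvBStep d ln
        = d.insert (String.ofList (ln.toList.takeWhile (fun c => c ≠ ':'))) (PySem.Str.strip (String.ofList val)) := by
      simp only [pvBStep, hdrop]
    constructor
    · by_cases hT : PySem.Str.startswith ln "Account Type:" = true
      · have hpre : ln.toList.takeWhile (fun c => c ≠ ':') = "Account Type".toList := hTiff.mp hT
        simp only [pvAStep, hT, if_true, hval, hBval, hpre]
        rw [show String.ofList ("Account Type".toList) = "Account Type" from by decide]
        exact PySem.Dict.get?_insert_self d _ _
      · have hne : ("Account Type" : String) ≠ String.ofList (ln.toList.takeWhile (fun c => c ≠ ':')) := by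
          intro heq
          apply hT
          apply hTiff.mpr
          rw [heq, String.toList_ofList]
        simp only [pvAStep, hT, hBval]
        rw [PySem.Dict.get?_insert_of_ne d _ hne]
        exact h1
    · by_cases hN : PySem.Str.startswith ln "Account Number:" = true
      · have hpre : ln.toList.takeWhile (fun c => c ≠ ':') = "Account Number".toList := hNiff.mp hN
        simp only [pvAStep, hN, if_true, hval, hBval, hpre]
        rw [show String.ofList ("Account Number".toList) = "Account Number" from by decide]
        exact PySem.Dict.get?_insert_self d _ _
      · have hne : ("Account Number" : String) ≠ String.ofList (ln.toList.takeWhile (fun c => c ≠ ':')) := by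
          intro heq
          apply hN
          apply hNiff.mpr
          rw [heq, String.toList_ofList]
        simp only [pvAStep, hN, hBval]
        rw [PySem.Dict.get?_insert_of_ne d _ hne]
        exact h2

theorem pv_fold (lines : List String) :
    ∀ (d : PySem.Dict String String) (st : Option String × Option String),
    d.get? "Account Type" = st.1 → d.get? "Account Number" = st.2 →
    (lines.foldl pvBStep d).get? "Account Type" = (lines.foldl pvAStep st).1 ∧
    (lines.foldl pvBStep d).get? "Account Number" = (lines.foldl pvAStep st).2 := by
  induction lines with
  | nil => intro d st h1 h2; exact ⟨h1, h2⟩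
  | cons ln rest ih =>
    intro d st h1 h2
    obtain ⟨g1, g2⟩ := pv_step d st ln h1 h2
    exact ih (pvBStep d ln) (pvAStep st ln) g1 g2

-- ===== VERDICT (by name: the statement is the Claim_ definition above) =====
theorem parse_account_info_spec : Claim_equal_parse_account_info := by
  intro lines _
  unfold Spec_parse_account_info parse_account_info parse_account_info_alt
  obtain ⟨g1, g2⟩ := pv_fold lines PySem.Dict.empty (none, none) (by rfl) (by rfl)
  simp only at g1 g2 ⊢
  rw [g1, g2]
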